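-- pv_equiv track=rewrite | github.com/williamDalston/WriterAI | prometheus_novel/quality/editorial_craft.py | _chapters_from_scenes
-- ===== SOURCE A (Python) =====
-- from collections import defaultdict
-- from typing import Any, Dict, List, Optional
--
-- def _chapters_from_scenes(scenes: List[Dict]) -> Dict[int, str]:
--     """Build chapter_num -> full text."""
--     by_ch: Dict[int, List[str]] = defaultdict(list)
--     for s in (scenes or []):
--         if not isinstance(s, dict):
--             continue
--         ch = int(s.get("chapter", 0))
--         content = s.get("content", "")
--         if content:
--             by_ch[ch].append(content)
--     return {ch: "\n\n".join(texts) for ch, texts in by_ch.items()}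
-- ===== SOURCE B (Python) =====
-- def _chapters_from_scenes(scenes):
--     """Build chapter_num -> full text.
--
--     Selection-grouping alternative: extract the (chapter, content) pair list,
--     then recursively peel off the first chapter's group (gather all its
--     contents, drop them) until nothing is left."""
--     pairs = []
--     for s in (scenes or []):
--         if not isinstance(s, dict):
--             continue
--         ch = int(s.get("chapter", 0))
--         content = s.get("content", "")
--         if content:
--             pairs.append((ch, content))
--
--     def group(ps):
--         if not ps:
--             return {}
--         ch = ps[0][0]
--         out = {ch: "\n\n".join(c for k, c in ps if k == ch)}
--         out.update(group([(k, c) for k, c in ps if k != ch]))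
--         return out
--
--     return group(pairs)
-- ===== Notes on version B (the rewrite author's own statement) =====
-- stated objective: alternative
-- what changed: Replaces the single-pass defaultdict hash-grouping with selection grouping: flatten to a (chapter, content) pair list, then recursively peel off the first pair's chapter (join all its contents, filter it out) until the list is empty.
import Mathlib
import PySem

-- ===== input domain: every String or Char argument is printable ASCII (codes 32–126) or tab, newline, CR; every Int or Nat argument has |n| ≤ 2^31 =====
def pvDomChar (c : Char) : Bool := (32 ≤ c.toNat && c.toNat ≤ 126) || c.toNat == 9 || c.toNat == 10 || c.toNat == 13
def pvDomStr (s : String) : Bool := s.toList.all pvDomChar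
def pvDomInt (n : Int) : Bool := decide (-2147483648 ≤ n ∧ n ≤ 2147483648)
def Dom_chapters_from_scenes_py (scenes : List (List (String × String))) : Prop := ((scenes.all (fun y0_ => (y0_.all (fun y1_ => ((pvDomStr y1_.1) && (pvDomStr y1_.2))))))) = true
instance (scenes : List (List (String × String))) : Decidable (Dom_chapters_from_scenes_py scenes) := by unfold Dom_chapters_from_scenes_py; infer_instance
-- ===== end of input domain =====

-- B replaces A's single-pass defaultdict hash-grouping with selection grouping: a flat pair list,
-- then recursively peel off the first pair's chapter (join its contents, filter it out); alternative decomposition, not faster.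


-- ===== PORT A =====
-- `isinstance(s, dict)` is always true under the type convention (each scene IS a dict), so the
-- `continue` branch is vacuous and not ported. Under Pre_ the `int()` never raises; the port's
-- `.getD 0` is only reached outside Pre_.
def chapters_from_scenes_py (scenes : List (List (String × String))) : List (Int × String) :=
  let by_ch : PySem.Dict Int (List String) :=
    scenes.foldl (fun d s =>
      let ch : Int := match (PySem.Dict.ofList s).get? "chapter" with
        | none => 0
        | some v => (PySem.Int.ofStr? v).getD 0
      let content : String := ((PySem.Dict.ofList s).get? "content").getD ""
      if content ≠ "" then d.modify ch [] (· ++ [content]) else d) PySem.Dict.empty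
  by_ch.items.map (fun p => (p.1, PySem.Str.join "\n\n" p.2))

-- ===== PORT B =====
-- the `for s in scenes: … pairs.append((ch, content))` pass of Source B
def pvScenePairs : List (List (String × String)) → List (Int × String)
  | [] => []
  | s :: rest =>
    let ch : Int := match (PySem.Dict.ofList s).get? "chapter" with
      | none => 0
      | some v => (PySem.Int.ofStr? v).getD 0
    let content : String := ((PySem.Dict.ofList s).get? "content").getD ""
    if content ≠ "" then (ch, content) :: pvScenePairs rest else pvScenePairs rest

-- the recursive `group` of Source B: peel off the first chapter, recurse on the rest
def pvGroup : List (Int × String) → List (Int × String)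
  | [] => []
  | (ch, c) :: rest =>
    (ch, PySem.Str.join "\n\n" (c :: (rest.filter (fun p => p.1 == ch)).map (·.2))) ::
      pvGroup (rest.filter (fun p => !(p.1 == ch)))
termination_by ps => ps.length
decreasing_by simp; exact (List.length_filter_le _ _).trans (by simp)

def chapters_from_scenes_py_alt (scenes : List (List (String × String))) : List (Int × String) :=
  pvGroup (pvScenePairs scenes)

-- ===== PRECONDITION & SPEC =====
-- Pre_ excludes exactly the scenes whose "chapter" value is not an int literal, where Python's
-- int() raises ValueError in A (and in B alike).
def Pre_chapters_from_scenes_py (scenes : List (List (String × String))) : Prop :=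
  (scenes.all (fun s => match (PySem.Dict.ofList s).get? "chapter" with
    | none => true
    | some v => (PySem.Int.ofStr? v).isSome)) = true
instance (scenes : List (List (String × String))) : Decidable (Pre_chapters_from_scenes_py scenes) := by
  unfold Pre_chapters_from_scenes_py; infer_instance
def pvWitness_chapters_from_scenes_py : (List (List (String × String))) :=
  [[("chapter", "2"), ("content", "b")], [("chapter", "1"), ("content", "a")],
   [("chapter", "2"), ("content", "c")], [("content", "x")]]
def Spec_chapters_from_scenes_py (scenes : List (List (String × String))) (out : List (Int × String)) : Prop := out = chapters_from_scenes_py_alt scenes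
instance (scenes : List (List (String × String))) (out : List (Int × String)) : Decidable (Spec_chapters_from_scenes_py scenes out) := by unfold Spec_chapters_from_scenes_py; infer_instance

-- ===== CLAIM (what is proved, stated in full; the proofs are below) =====
def Claim_equal_chapters_from_scenes_py : Prop := ∀ (scenes : List (List (String × String))), Dom_chapters_from_scenes_py scenes → Pre_chapters_from_scenes_py scenes → Spec_chapters_from_scenes_py scenes (chapters_from_scenes_py scenes)

-- ===== LEMMAS AND PROOFS =====

-- The value a scene contributes: some (chapter, content) when content is non-empty, else none.
def pvPairOf (s : List (String × String)) : Option (Int × String) :=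
  let ch : Int := match (PySem.Dict.ofList s).get? "chapter" with
    | none => 0
    | some v => (PySem.Int.ofStr? v).getD 0
  let content : String := ((PySem.Dict.ofList s).get? "content").getD ""
  if content ≠ "" then some (ch, content) else none

theorem pvScenePairs_eq_filterMap (scenes : List (List (String × String))) :
    pvScenePairs scenes = scenes.filterMap pvPairOf := by
  induction scenes with
  | nil => rfl
  | cons s rest ih =>
    simp only [pvScenePairs, List.filterMap_cons]
    split_ifs with h
    · have hp : pvPairOf s = some
        ((match (PySem.Dict.ofList s).get? "chapter" with
          | none => 0
          | some v => (PySem.Int.ofStr? v).getD 0),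
         ((PySem.Dict.ofList s).get? "content").getD "") := by
        simp only [pvPairOf, if_pos h]
      rw [hp, ih]
    · have hp : pvPairOf s = none := by simp only [pvPairOf, if_neg h]
      rw [hp, ih]

theorem dict_eq_pairs_foldl (scenes : List (List (String × String)))
    (d : PySem.Dict Int (List String)) :
    scenes.foldl (fun d s =>
      let ch : Int := match (PySem.Dict.ofList s).get? "chapter" with
        | none => 0
        | some v => (PySem.Int.ofStr? v).getD 0
      let content : String := ((PySem.Dict.ofList s).get? "content").getD ""
      if content ≠ "" then d.modify ch [] (· ++ [content]) else d) d
    = (scenes.filterMap pvPairOf).foldl (fun d p => d.modify p.1 [] (· ++ [p.2])) d := by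
  induction scenes generalizing d with
  | nil => rfl
  | cons s rest ih =>
    simp only [List.foldl_cons, List.filterMap_cons]
    split_ifs with h
    · have hp : pvPairOf s = some
        ((match (PySem.Dict.ofList s).get? "chapter" with
          | none => 0
          | some v => (PySem.Int.ofStr? v).getD 0),
         ((PySem.Dict.ofList s).get? "content").getD "") := by
        simp only [pvPairOf, if_pos h]
      rw [hp, ih]
      rfl
    · have hp : pvPairOf s = none := by simp only [pvPairOf, if_neg h]
      rw [hp, ih]

-- A's value, characterised over the flat pair list.
theorem portA_char (scenes : List (List (String × String))) :
    chapters_from_scenes_py scenes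
      = (PySem.List.dedup ((scenes.filterMap pvPairOf).map (·.1))).map
          (fun ch => (ch, PySem.Str.join "\n\n"
            (((scenes.filterMap pvPairOf).filter (fun p => p.1 == ch)).map (·.2)))) := by
  unfold chapters_from_scenes_py
  rw [dict_eq_pairs_foldl]
  simp only []
  set P := scenes.filterMap pvPairOf with hP
  set D := P.foldl (fun d p => d.modify p.1 [] (· ++ [p.2])) (PySem.Dict.empty : PySem.Dict Int (List String)) with hD
  have hnd : D.keys.Nodup := by
    rw [hD]
    exact PySem.Dict.nodup_keys_foldl_modify_key P Prod.fst [] (fun d p => (· ++ [p.2])) _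
      PySem.Dict.nodup_keys_empty
  have hkeys : D.keys = PySem.List.dedup (P.map (·.1)) := by
    rw [hD, PySem.Dict.keys_foldl_modify_key]
    simp [PySem.Dict.keys_empty, PySem.Set.update, PySem.List.dedup_eq_ofList, PySem.Set.ofList]
  have hitems : D.items = D.keys.map (fun k => (k, D.getD k [])) :=
    PySem.Dict.items_eq_map_keys D hnd []
  rw [hitems, hkeys, List.map_map]
  apply List.map_congr_left
  intro ch _
  have hget : D.getD ch [] = (P.filter (fun p => p.1 == ch)).map (·.2) := by
    rw [hD, PySem.Dict.getD_foldl_modify_append]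
    simp [PySem.Dict.getD_empty]
  simp [hget]

-- dedup recurrence: first element kept, later copies dropped.
theorem dedup_cons {α : Type} [BEq α] [LawfulBEq α] (x : α) (l : List α) :
    PySem.List.dedup (x :: l) = x :: (PySem.List.dedup l).filter (fun y => !(y == x)) := by
  simp only [PySem.List.dedup_eq_ofList, PySem.Set.ofList_eq_foldl, List.foldl_cons]
  have h1 : PySem.Set.add ([] : List α) x = [x] := rfl
  rw [h1]
  have h2 : List.foldl PySem.Set.add [x] l = PySem.Set.update [x] l := rfl
  rw [h2, PySem.Set.update_eq_append_filter]
  simp only [PySem.Set.ofList_eq_foldl, List.singleton_append]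
  congr 1
  apply List.filter_congr
  intro y _
  simp [PySem.Set.contains, BEq.comm]

-- dedup commutes with filter (filter keeps order and first occurrences).
theorem dedup_filter {α : Type} [BEq α] [LawfulBEq α] (l : List α) (p : α → Bool) :
    PySem.List.dedup (l.filter p) = (PySem.List.dedup l).filter p := by
  induction l with
  | nil => rfl
  | cons x l ih =>
    by_cases hx : p x = true
    · rw [List.filter_cons_of_pos hx, dedup_cons, dedup_cons, ih,
        List.filter_cons_of_pos hx, List.filter_filter, List.filter_filter]
      congr 1
      apply List.filter_congr
      intro y _
      cases h : (y == x) <;> simp [Bool.and_comm]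
    · rw [List.filter_cons_of_neg hx, dedup_cons, ih, List.filter_cons_of_neg hx,
        List.filter_filter]
      apply List.filter_congr
      intro y _
      cases h : p y
      · simp
      · have : ¬ (y == x) = true := by
          intro hyx
          exact hx (by rwa [eq_of_beq hyx] at h)
        simp [this]

theorem map_fst_filter (rest : List (Int × String)) (q : Int → Bool) :
    (rest.filter (fun p => q p.1)).map (·.1) = (rest.map (·.1)).filter q := by
  induction rest with
  | nil => rfl
  | cons p r ih =>
    cases h : q p.1 <;> simp [h, ih]

-- B's recursive group computes the same dedup-and-join characterisation.
theorem pvGroup_char (ps : List (Int × String)) :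
    pvGroup ps = (PySem.List.dedup (ps.map (·.1))).map
      (fun ch => (ch, PySem.Str.join "\n\n" ((ps.filter (fun p => p.1 == ch)).map (·.2)))) := by
  generalize hn : ps.length = n
  induction n using Nat.strong_induction_on generalizing ps with
  | _ n ih =>
  match ps, hn with
  | [], _ => rw [pvGroup]; rfl
  | (ch, c) :: rest, hn =>
    rw [pvGroup, ih (rest.filter (fun p => !(p.1 == ch))).length
      (by rw [← hn]; exact Nat.lt_succ_of_le (List.length_filter_le _ _)) _ rfl]
    simp only [List.map_cons, dedup_cons]
    rw [map_fst_filter rest (fun y => !(y == ch)), ← dedup_filter]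
    congr 1
    · -- head entries agree
      simp
    · apply List.map_congr_left
      intro k hk
      have hkch : ¬ (k == ch) = true := by
        have hmem := (PySem.List.mem_dedup _ _).mp hk
        have := List.of_mem_filter hmem
        simpa using this
      have h1 : ((ch, c) :: rest).filter (fun p => p.1 == k)
          = rest.filter (fun p => p.1 == k) := by
        rw [List.filter_cons_of_neg]
        simp only [beq_iff_eq] at hkch ⊢
        exact fun h => hkch h.symm
      have h2 : (rest.filter (fun p => !(p.1 == ch))).filter (fun p => p.1 == k)
          = rest.filter (fun p => p.1 == k) := by
        rw [List.filter_filter]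
        apply List.filter_congr
        intro p _
        cases h : (p.1 == k)
        · simp
        · have : ¬ (p.1 == ch) = true := by
            intro hc
            exact hkch (by rw [beq_iff_eq] at h hc ⊢; rw [← h, hc])
          simp [this]
      rw [h1, h2]

theorem chapters_from_scenes_py_spec' (scenes : List (List (String × String))) :
    chapters_from_scenes_py scenes = chapters_from_scenes_py_alt scenes := by
  rw [portA_char]
  unfold chapters_from_scenes_py_alt
  rw [pvScenePairs_eq_filterMap, pvGroup_char]

-- ===== VERDICT (by name: the statement is the Claim_ definition above) =====
theorem chapters_from_scenes_py_spec : Claim_equal_chapters_from_scenes_py := by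
  intro scenes _ _
  exact chapters_from_scenes_py_spec' scenes
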